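-- pv_equiv track=rewrite | github.com/samjd-zz/regulatory-intelligence-assistant | backend/services/compliance_checker.py | _infer_field_name
-- ===== SOURCE A (Python) =====
-- from typing import List, Dict, Optional, Any, Tuple
--
-- def _infer_field_name(requirement_text: str) -> Optional[str]:
--     """Infer field name from requirement text."""
--     # Enhanced keyword matching with more patterns
--     field_mappings = {
--         # Primary identifiers
--         'social insurance number': 'sin',
--         'sin': 'sin',
--         'work permit': 'work_permit',
--         'employment': 'employment_status',
--         'address': 'address',
--         'proof of residency': 'residency_proof',
--         'identification': 'id_document',
--         'id_document': 'id_document',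
--
--         # Employment related
--         'hours worked': 'hours_worked',
--         'hours of work': 'hours_worked',
--         'employment status': 'employment_status',
--         'employed': 'employment_status',
--
--         # Personal information
--         'full name': 'full_name',
--         'legal name': 'full_name',
--         'name': 'full_name',
--
--         # Residency
--         'residency': 'residency_status',
--         'resident': 'residency_status',
--         'citizenship': 'residency_status',
--         'citizen': 'residency_status',
--     }
--
--     text_lower = requirement_text.lower()
--
--     # Try exact phrase matches first (longer phrases first)
--     sorted_keywords = sorted(field_mappings.keys(), key=len, reverse=True)
--     for keyword in sorted_keywords:
--         if keyword in text_lower: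
--             return field_mappings[keyword]
--
--     return None
-- ===== SOURCE B (Python) =====
-- from typing import List, Dict, Optional, Any, Tuple
--
-- # The same keyword table as the mapping dict, pre-grouped ONCE by keyword length
-- # (longest group first; within a group, original insertion order).  A first match
-- # found while scanning group by group is therefore the longest matching keyword,
-- # with ties broken by insertion order.
-- _KEYWORDS_BY_LENGTH = [
--     [('social insurance number', 'sin')],                                   # 23
--     [('proof of residency', 'residency_proof')],                            # 18
--     [('employment status', 'employment_status')],                           # 17
--     [('identification', 'id_document')],                                    # 14
--     [('hours of work', 'hours_worked')],                                    # 13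
--     [('hours worked', 'hours_worked')],                                     # 12
--     [('work permit', 'work_permit'), ('id_document', 'id_document'),
--      ('citizenship', 'residency_status')],                                  # 11
--     [('employment', 'employment_status'), ('legal name', 'full_name')],     # 10
--     [('full name', 'full_name'), ('residency', 'residency_status')],        # 9
--     [('employed', 'employment_status'), ('resident', 'residency_status')],  # 8
--     [('address', 'address'), ('citizen', 'residency_status')],              # 7
--     [('name', 'full_name')],                                                # 4
--     [('sin', 'sin')],                                                       # 3
-- ]
--
-- def _infer_field_name(requirement_text: str) -> Optional[str]:
--     """Infer field name from requirement text (longest keyword wins)."""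
--     text_lower = requirement_text.lower()
--     for bucket in _KEYWORDS_BY_LENGTH:
--         for keyword, field in bucket:
--             if keyword in text_lower:
--                 return field
--     return None
-- ===== Notes on version B (the rewrite author's own statement) =====
-- stated objective: simpler
-- what changed: B replaces A's per-call dict construction and sort-keys-by-length-descending-then-first-match with a table pre-grouped once by keyword length (longest bucket first, insertion order within a bucket) scanned by two nested first-match loops, which preserves A's longest-keyword-wins, earliest-on-ties result with no sorting at call time.
import Mathlib
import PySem

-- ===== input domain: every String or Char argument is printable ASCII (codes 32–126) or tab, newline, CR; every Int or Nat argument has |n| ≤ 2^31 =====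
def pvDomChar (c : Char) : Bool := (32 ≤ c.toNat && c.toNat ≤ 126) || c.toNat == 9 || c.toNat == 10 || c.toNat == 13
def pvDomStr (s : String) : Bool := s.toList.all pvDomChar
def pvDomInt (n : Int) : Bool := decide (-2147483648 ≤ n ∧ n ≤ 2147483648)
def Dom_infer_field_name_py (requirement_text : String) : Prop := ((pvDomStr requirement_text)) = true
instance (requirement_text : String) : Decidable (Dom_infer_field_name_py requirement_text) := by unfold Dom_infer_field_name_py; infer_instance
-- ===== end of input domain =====

-- B replaces A's per-call dict build + sort-by-length + first-match loop with a table
-- pre-grouped once by keyword length (longest bucket first) scanned by nested loops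
-- (objective: simpler; same value, incl. longest-wins, earliest-on-ties).

-- ===== PORT A =====
def pvFieldMappingsA : PySem.Dict String String :=
  PySem.Dict.ofList
    [ ("social insurance number", "sin"), ("sin", "sin"), ("work permit", "work_permit"),
      ("employment", "employment_status"), ("address", "address"),
      ("proof of residency", "residency_proof"), ("identification", "id_document"),
      ("id_document", "id_document"), ("hours worked", "hours_worked"),
      ("hours of work", "hours_worked"), ("employment status", "employment_status"),
      ("employed", "employment_status"), ("full name", "full_name"),
      ("legal name", "full_name"), ("name", "full_name"), ("residency", "residency_status"),
      ("resident", "residency_status"), ("citizenship", "residency_status"),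
      ("citizen", "residency_status") ]

-- A's for-loop: first keyword of the sorted list contained in the text returns its mapping.
-- (d.get? k = none would be Python's KeyError; unreachable: every k comes from d.keys.)
def pvLoopA (m : String → Bool) (d : PySem.Dict String String) : List String → Option String
  | [] => none
  | k :: rest => if m k then d.get? k else pvLoopA m d rest

def infer_field_name_py (requirement_text : String) : Option String :=
  let field_mappings := pvFieldMappingsA
  let text_lower := PySem.Str.lower requirement_text
  let sorted_keywords := PySem.List.sorted field_mappings.keys (fun k => PySem.Str.len k) true
  pvLoopA (fun keyword => PySem.Str.isIn keyword text_lower) field_mappings sorted_keywords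

-- ===== PORT B =====
def pvKeywordsByLength : List (List (String × String)) :=
  [ [("social insurance number", "sin")],
    [("proof of residency", "residency_proof")],
    [("employment status", "employment_status")],
    [("identification", "id_document")],
    [("hours of work", "hours_worked")],
    [("hours worked", "hours_worked")],
    [("work permit", "work_permit"), ("id_document", "id_document"),
      ("citizenship", "residency_status")],
    [("employment", "employment_status"), ("legal name", "full_name")],
    [("full name", "full_name"), ("residency", "residency_status")],
    [("employed", "employment_status"), ("resident", "residency_status")],
    [("address", "address"), ("citizen", "residency_status")],
    [("name", "full_name")],
    [("sin", "sin")] ]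

-- B's inner loop: first pair of the bucket whose keyword matches returns its field.
def pvScanBucket (m : String → Bool) : List (String × String) → Option String
  | [] => none
  | kv :: rest => if m kv.1 then some kv.2 else pvScanBucket m rest

-- B's outer loop over the buckets; an inner return propagates out.
def pvScanBuckets (m : String → Bool) : List (List (String × String)) → Option String
  | [] => none
  | b :: rest =>
    match pvScanBucket m b with
    | some f => some f
    | none => pvScanBuckets m rest

def infer_field_name_py_alt (requirement_text : String) : Option String :=
  let text_lower := PySem.Str.lower requirement_text
  pvScanBuckets (fun keyword => PySem.Str.isIn keyword text_lower) pvKeywordsByLength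

-- ===== PRECONDITION & SPEC =====
def Spec_infer_field_name_py (requirement_text : String) (out : Option String) : Prop := out = infer_field_name_py_alt requirement_text
instance (requirement_text : String) (out : Option String) : Decidable (Spec_infer_field_name_py requirement_text out) := by unfold Spec_infer_field_name_py; infer_instance

-- ===== CLAIM (what is proved, stated in full; the proofs are below) =====
def Claim_equal_infer_field_name_py : Prop := ∀ (requirement_text : String), Dom_infer_field_name_py requirement_text → Spec_infer_field_name_py requirement_text (infer_field_name_py requirement_text)

-- ===== LEMMAS AND PROOFS =====

-- A's sorted keyword list paired with the fields the dict maps them to.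
def pvSortedPairs : List (String × String) :=
  [ ("social insurance number", "sin"), ("proof of residency", "residency_proof"),
    ("employment status", "employment_status"), ("identification", "id_document"),
    ("hours of work", "hours_worked"), ("hours worked", "hours_worked"),
    ("work permit", "work_permit"), ("id_document", "id_document"),
    ("citizenship", "residency_status"), ("employment", "employment_status"),
    ("legal name", "full_name"), ("full name", "full_name"),
    ("residency", "residency_status"), ("employed", "employment_status"),
    ("resident", "residency_status"), ("address", "address"),
    ("citizen", "residency_status"), ("name", "full_name"), ("sin", "sin") ]

lemma pvScanBucket_append (m : String → Bool) (a b : List (String × String)) :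
    pvScanBucket m (a ++ b)
      = (match pvScanBucket m a with
         | some f => some f
         | none => pvScanBucket m b) := by
  induction a with
  | nil => simp [pvScanBucket]
  | cons kv rest ih =>
    by_cases h : m kv.1 = true
    · simp [pvScanBucket, h]
    · simp [pvScanBucket, Bool.eq_false_iff.mpr h, ih]

lemma pvScanBuckets_eq_flat (m : String → Bool) (l : List (List (String × String))) :
    pvScanBuckets m l = pvScanBucket m (l.flatMap id) := by
  induction l with
  | nil => rfl
  | cons b rest ih =>
    rw [List.flatMap_cons, pvScanBucket_append, pvScanBuckets]
    cases hb : pvScanBucket m b <;> simp [hb, ih, List.flatMap_id]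

lemma pvLoopA_eq_scan (m : String → Bool) (d : PySem.Dict String String)
    (ps : List (String × String)) (h : ∀ kv ∈ ps, d.get? kv.1 = some kv.2) :
    pvLoopA m d (ps.map Prod.fst) = pvScanBucket m ps := by
  induction ps with
  | nil => rfl
  | cons kv rest ih =>
    rw [List.map_cons, pvLoopA, pvScanBucket]
    by_cases hm : m kv.1 = true
    · rw [if_pos hm, if_pos hm, h kv List.mem_cons_self]
    · rw [if_neg hm, if_neg hm]
      exact ih (fun kv' h' => h kv' (List.mem_cons_of_mem _ h'))

lemma pvSorted_eq :
    PySem.List.sorted pvFieldMappingsA.keys (fun k => PySem.Str.len k) true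
      = pvSortedPairs.map Prod.fst := by decide

lemma pvFlat_eq : pvKeywordsByLength.flatMap id = pvSortedPairs := by decide

lemma pvGet : ∀ kv ∈ pvSortedPairs, pvFieldMappingsA.get? kv.1 = some kv.2 := by decide

-- ===== VERDICT (by name: the statement is the Claim_ definition above) =====
theorem infer_field_name_py_spec : Claim_equal_infer_field_name_py := by
  intro t _
  unfold Spec_infer_field_name_py
  show pvLoopA (fun keyword => PySem.Str.isIn keyword (PySem.Str.lower t)) pvFieldMappingsA
        (PySem.List.sorted pvFieldMappingsA.keys (fun k => PySem.Str.len k) true)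
      = pvScanBuckets (fun keyword => PySem.Str.isIn keyword (PySem.Str.lower t))
          pvKeywordsByLength
  rw [pvSorted_eq, pvScanBuckets_eq_flat, pvFlat_eq, pvLoopA_eq_scan _ _ _ pvGet]
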